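-- pv_equiv track=rewrite | github.com/kwan3217/advent2024 | src/dec04.py | search_pat
-- ===== SOURCE A (Python) =====
-- def search_pat(word_search:list[str],pat:list[list[str]]=None)->int:
--     """
--     Find a 2D pattern in a word search
--     :param word_search:
--     :param pat: Pattern to search for. Must be rectangular IE
--                 all rows the same length. Use NONE for the
--                 don't care condition
--     :return: Number of times the pattern hits
--     """
--     if pat is None:
--         pat=[["M",None,"S"],
--              [None,"A",None],
--              ["M",None,"S"]]
--     n_rows=len(word_search)
--     n_cols=len(word_search[0])
--     n_rows_pat=len(pat)
--     n_cols_pat=len(pat[0])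
--     result=0
--     for i_row in range(n_rows-n_rows_pat+1):
--         for i_col in range(n_cols-n_cols_pat+1):
--             found=True
--             for i_row_pat in range(n_rows_pat):
--                 for i_col_pat in range(n_cols_pat):
--                     if pat[i_row_pat][i_col_pat] is not None and pat[i_row_pat][i_col_pat]!=word_search[i_row+i_row_pat][i_col+i_col_pat]:
--                         found=False
--             if found:
--                 result+=1
--     return result
-- ===== SOURCE B (Python) =====
-- def search_pat(word_search: list[str], pat: list[list[str]] = None) -> int:
--     """Constraint sieve: start from the full set of candidate top-left offsets
--     and narrow it by one non-None pattern cell at a time; survivors are hits."""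
--     if pat is None:
--         pat = [["M", None, "S"],
--                [None, "A", None],
--                ["M", None, "S"]]
--     constraints = [(dr, dc, ch)
--                    for dr, row in enumerate(pat)
--                    for dc, ch in enumerate(row)
--                    if ch is not None]
--     candidates = [(i, j)
--                   for i in range(len(word_search) - len(pat) + 1)
--                   for j in range(len(word_search[0]) - len(pat[0]) + 1)]
--     for dr, dc, ch in constraints:
--         candidates = [(i, j) for (i, j) in candidates
--                       if word_search[i + dr][j + dc] == ch]
--     return len(candidates)
-- ===== Notes on version B (the rewrite author's own statement) =====
-- stated objective: alternative
-- what changed: A scans the full pattern rectangle with a found flag at every top-left offset; B instead builds the full list of candidate offsets once and then sieves it, one non-None pattern constraint at a time, filtering out every surviving candidate that violates the constraint, and returns the number of survivors.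
-- outside the precondition, e.g. on search_pat(['AA', 'BA'], [[None], ['A', 'A']]): A returns 1, B raises IndexError; on search_pat(['a', 'b'], [['a'], ['b', 'x']]): A returns 1, B raises IndexError
import Mathlib
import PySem

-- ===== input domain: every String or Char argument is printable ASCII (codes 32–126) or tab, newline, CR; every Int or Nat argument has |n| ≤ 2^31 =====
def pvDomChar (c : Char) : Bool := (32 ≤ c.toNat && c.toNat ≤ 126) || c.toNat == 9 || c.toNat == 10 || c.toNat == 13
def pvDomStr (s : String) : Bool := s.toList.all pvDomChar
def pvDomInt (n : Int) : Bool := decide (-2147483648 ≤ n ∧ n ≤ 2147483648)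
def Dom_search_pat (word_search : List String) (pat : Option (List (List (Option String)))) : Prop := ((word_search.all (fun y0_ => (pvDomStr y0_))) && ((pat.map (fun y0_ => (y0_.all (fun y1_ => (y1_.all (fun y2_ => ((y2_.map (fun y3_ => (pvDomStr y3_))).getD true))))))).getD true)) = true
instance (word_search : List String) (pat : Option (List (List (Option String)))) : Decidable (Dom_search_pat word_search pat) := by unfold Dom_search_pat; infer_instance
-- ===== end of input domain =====

-- B replaces A's per-offset scan of the full pattern rectangle (a found flag over all
-- r×c cells at every offset) by a constraint sieve: the full candidate-offset list is
-- built once and narrowed by one non-None pattern cell at a time (objective: alternative).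

-- ===== PORT A =====
-- the 1-character string word_search[r][c] that A compares a pattern cell against
def pvCharStrA (ws : List String) (r c : Int) : String :=
  match PySem.Str.pyGet? (PySem.List.pyGetD ws r "") c with
  | some ch => String.ofList [ch]
  | none => ""

-- A's test "pat[dr][dc] is not None and pat[dr][dc] != word_search[i+dr][j+dc]"
def pvMismA (p : List (List (Option String))) (ws : List String) (i j dr dc : Int) : Bool :=
  let cell := PySem.List.pyGetD (PySem.List.pyGetD p dr []) dc none
  cell.isSome && cell != some (pvCharStrA ws (i + dr) (j + dc))

def search_pat (word_search : List String) (pat : Option (List (List (Option String)))) : Int :=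
  let p := pat.getD [[some "M", none, some "S"], [none, some "A", none], [some "M", none, some "S"]]
  let n_rows : Int := word_search.length
  let n_cols : Int := PySem.Str.len (PySem.List.pyGetD word_search 0 "")
  let n_rows_pat : Int := p.length
  let n_cols_pat : Int := (PySem.List.pyGetD p 0 []).length
  (PySem.List.pyRange 0 (n_rows - n_rows_pat + 1) 1).foldl (fun result i_row =>
    (PySem.List.pyRange 0 (n_cols - n_cols_pat + 1) 1).foldl (fun result i_col =>
      let found := (PySem.List.pyRange 0 n_rows_pat 1).foldl (fun found i_row_pat =>
        (PySem.List.pyRange 0 n_cols_pat 1).foldl (fun found i_col_pat =>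
          if pvMismA p word_search i_row i_col i_row_pat i_col_pat then false else found) found) true
      if found then result + 1 else result) result) 0

-- ===== PORT B =====
-- B's per-constraint check "word_search[i+dr][j+dc] == ch" for a constraint (dr, dc, ch);
-- the `none` branch is Python's IndexError, excluded by Pre_
def pvOkB (ws : List String) (i j : Int) (t : Int × Int × String) : Bool :=
  match PySem.Str.pyGet? (PySem.List.pyGetD ws (i + t.1) "") (j + t.2.1) with
  | some ch => t.2.2 == String.ofList [ch]
  | none => false

def search_pat_alt (word_search : List String) (pat : Option (List (List (Option String)))) : Int :=
  let p := pat.getD [[some "M", none, some "S"], [none, some "A", none], [some "M", none, some "S"]]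
  let constraints : List (Int × Int × String) :=
    (PySem.List.enumerate p 0).flatMap (fun rowe =>
      (PySem.List.enumerate rowe.2 0).filterMap (fun ce => ce.2.map (fun ch => (rowe.1, ce.1, ch))))
  let candidates : List (Int × Int) :=
    (PySem.List.pyRange 0 ((word_search.length : Int) - (p.length : Int) + 1) 1).flatMap (fun i =>
      (PySem.List.pyRange 0 (PySem.Str.len (PySem.List.pyGetD word_search 0 "") - ((PySem.List.pyGetD p 0 []).length : Int) + 1) 1).map (fun j => (i, j)))
  ((constraints.foldl (fun cand t => cand.filter (fun o => pvOkB word_search o.1 o.2 t)) candidates).length : Int)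

-- ===== PRECONDITION & SPEC =====
-- Pre_ excludes inputs where A raises IndexError (empty grid, empty pattern) and inputs
-- where B's natural sieve raises IndexError while A still returns: ragged patterns whose
-- extra row cells A's range-based loops silently ignore but B's constraint table reads,
-- and grids with a short row on which some non-None constraint fetch lands past the end;
-- when the pattern does not fit at all both loops are empty, so nothing else is required.
def Pre_search_pat (word_search : List String) (pat : Option (List (List (Option String)))) : Prop :=
  word_search ≠ [] ∧
  pat.getD [[some "M", none, some "S"], [none, some "A", none], [some "M", none, some "S"]] ≠ [] ∧
  ((word_search.length < (pat.getD [[some "M", none, some "S"], [none, some "A", none], [some "M", none, some "S"]]).length ∨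
    (word_search.headD "").toList.length < ((pat.getD [[some "M", none, some "S"], [none, some "A", none], [some "M", none, some "S"]]).headD []).length) ∨
   ((∀ row ∈ pat.getD [[some "M", none, some "S"], [none, some "A", none], [some "M", none, some "S"]],
      row.length = ((pat.getD [[some "M", none, some "S"], [none, some "A", none], [some "M", none, some "S"]]).headD []).length) ∧
    (∀ i < word_search.length + 1 - (pat.getD [[some "M", none, some "S"], [none, some "A", none], [some "M", none, some "S"]]).length,
     ∀ j < (word_search.headD "").toList.length + 1 - ((pat.getD [[some "M", none, some "S"], [none, some "A", none], [some "M", none, some "S"]]).headD []).length,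
     ∀ k < (pat.getD [[some "M", none, some "S"], [none, some "A", none], [some "M", none, some "S"]]).length,
     ∀ m < ((pat.getD [[some "M", none, some "S"], [none, some "A", none], [some "M", none, some "S"]]).headD []).length,
       (((pat.getD [[some "M", none, some "S"], [none, some "A", none], [some "M", none, some "S"]]).getD k []).getD m none).isSome = true →
         j + m < (word_search.getD (i + k) "").toList.length)))
instance (word_search : List String) (pat : Option (List (List (Option String)))) : Decidable (Pre_search_pat word_search pat) := by unfold Pre_search_pat; infer_instance

def pvWitness_search_pat : List String × Option (List (List (Option String))) :=
  (["AB", "AB"], some [[some "A", none], [none, some "B"]])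

def Spec_search_pat (word_search : List String) (pat : Option (List (List (Option String)))) (out : Int) : Prop := out = search_pat_alt word_search pat
instance (word_search : List String) (pat : Option (List (List (Option String)))) (out : Int) : Decidable (Spec_search_pat word_search pat out) := by unfold Spec_search_pat; infer_instance

-- ===== CLAIM (what is proved, stated in full; the proofs are below) =====
def Claim_equal_search_pat : Prop := ∀ (word_search : List String) (pat : Option (List (List (Option String)))), Dom_search_pat word_search pat → Pre_search_pat word_search pat → Spec_search_pat word_search pat (search_pat word_search pat)

-- ===== LEMMAS AND PROOFS =====
-- the grid character both programs fetch at (r, c), as a `some`, under in-range bounds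
lemma pv_grid_char (ws : List String) (r c : Int) (hc0 : 0 ≤ c)
    (hc : c < ((PySem.List.pyGetD ws r "").toList.length : Int)) :
    PySem.Str.pyGet? (PySem.List.pyGetD ws r "") c
      = some ((PySem.List.pyGetD ws r "").toList[c.toNat]'(by omega)) := by
  simp only [PySem.Str.pyGet?, PySem.Chars.pyGet?_eq_listPyGet?]
  exact PySem.List.pyGet?_eq_some_getElem _ (by omega) (by exact_mod_cast hc)

lemma pv_getD_zero_headD {α : Type} (xs : List α) (d : α) :
    PySem.List.pyGetD xs 0 d = xs.headD d := by
  cases xs <;> simp [PySem.List.pyGetD_zero]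

lemma pv_pyRange_nil (b : Int) (hb : b ≤ 0) : PySem.List.pyRange 0 b 1 = [] := by
  apply List.eq_nil_iff_forall_not_mem.mpr
  intro x hx
  rw [PySem.List.mem_pyRange_one] at hx
  omega

-- B's constraint-at-a-time sieve of a candidate list equals one filter by the
-- conjunction of all constraints
lemma pv_sieve {α β : Type} (ok : α → β → Bool) (C : List β) (cand : List α) :
    C.foldl (fun cand t => cand.filter (fun o => ok o t)) cand
      = cand.filter (fun o => C.all (fun t => ok o t)) := by
  induction C generalizing cand with
  | nil => simp
  | cons t C ih =>
    rw [List.foldl_cons, ih, List.filter_filter]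
    simp [Bool.and_comm]

-- A's counting double loop over the offset rectangle equals the length of the
-- filtered candidate-pair list B builds
lemma pv_count (I J : List Int) (q : Int → Int → Bool) (a : Int) :
    I.foldl (fun acc i => J.foldl (fun acc j => if q i j then acc + 1 else acc) acc) a
      = a + (((I.flatMap (fun i => J.map (fun j => (i, j)))).filter (fun o => q o.1 o.2)).length : Int) := by
  induction I generalizing a with
  | nil => simp
  | cons i I ih =>
    rw [List.foldl_cons, PySem.List.foldl_if_add_one, ih]
    simp only [List.flatMap_cons, List.filter_append, List.length_append, List.filter_map,
      Function.comp_def, List.length_map, List.countP_eq_length_filter]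
    push_cast
    ring

-- A's found-flag double loop over the full pattern rectangle equals B's all-constraints
-- check, at an offset (i, j) that keeps every touched index in range
lemma pv_found_eq (ws : List String) (p : List (List (Option String)))
    (hrect : ∀ row ∈ p, row.length = (PySem.List.pyGetD p 0 []).length)
    (i j : Int) (hj0 : 0 ≤ j)
    (hfetch : ∀ dr dc : Int, 0 ≤ dr → dr < (p.length : Int) → 0 ≤ dc →
      dc < ((PySem.List.pyGetD p 0 []).length : Int) →
      (PySem.List.pyGetD (PySem.List.pyGetD p dr []) dc none).isSome = true →
      j + dc < ((PySem.List.pyGetD ws (i + dr) "").toList.length : Int)) :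
    ((PySem.List.pyRange 0 (p.length : Int) 1).foldl (fun found dr =>
      (PySem.List.pyRange 0 ((PySem.List.pyGetD p 0 []).length : Int) 1).foldl (fun found dc =>
        if pvMismA p ws i j dr dc then false else found) found) true)
    = ((PySem.List.enumerate p 0).flatMap (fun rowe =>
        (PySem.List.enumerate rowe.2 0).filterMap (fun ce => ce.2.map (fun ch => (rowe.1, ce.1, ch))))).all (pvOkB ws i j) := by
  have hb : ∀ (b c : Bool), (b && !c) = if c then false else b := by decide
  simp only [PySem.List.foldl_if_false_eq, hb]
  have hnot : ∀ X : Bool, (if X = true then false else true) = !X := by decide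
  rw [hnot, List.all_eq_not_any_not]
  congr 1
  rw [Bool.eq_iff_iff]
  simp only [List.any_eq_true, List.mem_flatMap, List.mem_filterMap, PySem.List.mem_enumerate_iff,
    PySem.List.mem_pyRange_one, Option.map_eq_some_iff]
  constructor
  · rintro ⟨dr, ⟨hdr0, hdrR⟩, dc, ⟨hdc0, hdcC⟩, hm⟩
    have hk : dr.toNat < p.length := by omega
    have hrow : PySem.List.pyGetD p dr [] = p[dr.toNat] :=
      PySem.List.pyGetD_eq_getElem p [] hdr0 (by exact_mod_cast hdrR)
    have hrl : p[dr.toNat].length = (PySem.List.pyGetD p 0 []).length :=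
      hrect _ (p.getElem_mem hk)
    have hmm : dc.toNat < p[dr.toNat].length := by omega
    have hcell : PySem.List.pyGetD p[dr.toNat] dc none = p[dr.toNat][dc.toNat] :=
      PySem.List.pyGetD_eq_getElem _ none hdc0 (by exact_mod_cast (by omega : dc < (p[dr.toNat].length : Int)))
    simp only [pvMismA, hrow, hcell] at hm
    obtain ⟨hsomeb, hneb⟩ := (Bool.and_eq_true _ _).mp hm
    obtain ⟨ch, hsome⟩ := Option.isSome_iff_exists.mp hsomeb
    have hc := hfetch dr dc hdr0 hdrR hdc0 hdcC (by rw [hrow, hcell]; exact hsomeb)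
    have hg := pv_grid_char ws (i + dr) (j + dc) (by omega) hc
    have hcs : pvCharStrA ws (i + dr) (j + dc)
        = String.ofList [(PySem.List.pyGetD ws (i + dr) "").toList[(j + dc).toNat]'(by omega)] := by
      unfold pvCharStrA
      rw [hg]
    rw [hsome, hcs] at hneb
    have hne : ch ≠ String.ofList [(PySem.List.pyGetD ws (i + dr) "").toList[(j + dc).toNat]'(by omega)] := by
      simpa using hneb
    refine ⟨(dr, dc, ch), ⟨(0 + (dr.toNat : Int), p[dr.toNat]), ⟨dr.toNat, hk, rfl⟩,
      (0 + (dc.toNat : Int), p[dr.toNat][dc.toNat]), ⟨dc.toNat, hmm, rfl⟩, ch, hsome, ?_⟩, ?_⟩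
    · simp only [Prod.mk.injEq]
      and_intros <;> first | omega | trivial
    · have hok : pvOkB ws i j (dr, dc, ch) = false := by
        simp only [pvOkB, hg]
        simpa using hne
      simp [hok]
  · rintro ⟨x, ⟨a, ⟨k, hk, rfl⟩, a1, ⟨m, hm', rfl⟩, ch, hsome, rfl⟩, hnok⟩
    dsimp only at hm' hsome hnok
    simp only [zero_add] at hnok
    have hrow : PySem.List.pyGetD p (k : Int) [] = p[k] := by
      rw [PySem.List.pyGetD_eq_getElem p [] (by omega) (by exact_mod_cast hk)]
      simp
    have hcell : PySem.List.pyGetD p[k] (m : Int) none = p[k][m] := by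
      rw [PySem.List.pyGetD_eq_getElem _ none (by omega) (by exact_mod_cast hm')]
      simp
    have hdcC : (m : Int) < ((PySem.List.pyGetD p 0 []).length : Int) := by
      have := hrect _ (p.getElem_mem hk)
      omega
    have hc := hfetch (k : Int) (m : Int) (by omega) (by exact_mod_cast hk) (by omega) hdcC
      (by rw [hrow, hcell, hsome]; rfl)
    have hg := pv_grid_char ws (i + (k : Int)) (j + (m : Int)) (by omega) hc
    have hcs : pvCharStrA ws (i + (k : Int)) (j + (m : Int))
        = String.ofList [(PySem.List.pyGetD ws (i + (k : Int)) "").toList[(j + (m : Int)).toNat]'(by omega)] := by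
      unfold pvCharStrA
      rw [hg]
    have hne : ch ≠ String.ofList [(PySem.List.pyGetD ws (i + (k : Int)) "").toList[(j + (m : Int)).toNat]'(by omega)] := by
      simp only [pvOkB, hg] at hnok
      simpa using hnok
    refine ⟨(k : Int), ⟨by omega, by exact_mod_cast hk⟩, (m : Int), ⟨by omega, hdcC⟩, ?_⟩
    simp only [pvMismA, hrow, hcell, hsome, hcs]
    simp [hne]

-- ===== VERDICT (by name: the statement is the Claim_ definition above) =====
theorem search_pat_spec : Claim_equal_search_pat := by
  intro ws pat _ hpre
  obtain ⟨hws, hp, hrest⟩ := hpre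
  unfold Spec_search_pat
  have hcw : PySem.List.pyGetD ws 0 "" = ws.headD "" := pv_getD_zero_headD ws ""
  have hcp : PySem.List.pyGetD (pat.getD [[some "M", none, some "S"], [none, some "A", none], [some "M", none, some "S"]]) 0 []
      = (pat.getD [[some "M", none, some "S"], [none, some "A", none], [some "M", none, some "S"]]).headD [] := pv_getD_zero_headD _ []
  have hcpl := congrArg List.length hcp
  unfold search_pat search_pat_alt
  dsimp only
  rw [pv_sieve]
  rcases hrest with (h1 | h2) | ⟨hrect, hfetchN⟩
  · rw [pv_pyRange_nil ((ws.length : Int) - ((pat.getD [[some "M", none, some "S"], [none, some "A", none], [some "M", none, some "S"]]).length : Int) + 1) (by omega)]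
    simp
  · rw [pv_pyRange_nil (PySem.Str.len (PySem.List.pyGetD ws 0 "") - ((PySem.List.pyGetD (pat.getD [[some "M", none, some "S"], [none, some "A", none], [some "M", none, some "S"]]) 0 []).length : Int) + 1)
      (by rw [hcw, PySem.Str.len_eq, hcp]; omega)]
    simp [List.flatMap]
  have hrect' : ∀ row ∈ pat.getD [[some "M", none, some "S"], [none, some "A", none], [some "M", none, some "S"]],
      row.length = (PySem.List.pyGetD (pat.getD [[some "M", none, some "S"], [none, some "A", none], [some "M", none, some "S"]]) 0 []).length := by
    rw [hcp]; exact hrect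
  have hstep1 :
      (PySem.List.pyRange 0 ((ws.length : Int) - ((pat.getD [[some "M", none, some "S"], [none, some "A", none], [some "M", none, some "S"]]).length : Int) + 1) 1).foldl (fun result i_row =>
        (PySem.List.pyRange 0 (PySem.Str.len (PySem.List.pyGetD ws 0 "") - ((PySem.List.pyGetD (pat.getD [[some "M", none, some "S"], [none, some "A", none], [some "M", none, some "S"]]) 0 []).length : Int) + 1) 1).foldl (fun result i_col =>
          let found := (PySem.List.pyRange 0 ((pat.getD [[some "M", none, some "S"], [none, some "A", none], [some "M", none, some "S"]]).length : Int) 1).foldl (fun found i_row_pat =>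
            (PySem.List.pyRange 0 ((PySem.List.pyGetD (pat.getD [[some "M", none, some "S"], [none, some "A", none], [some "M", none, some "S"]]) 0 []).length : Int) 1).foldl (fun found i_col_pat =>
              if pvMismA (pat.getD [[some "M", none, some "S"], [none, some "A", none], [some "M", none, some "S"]]) ws i_row i_col i_row_pat i_col_pat then false else found) found) true
          if found then result + 1 else result) result) (0 : Int)
      = (PySem.List.pyRange 0 ((ws.length : Int) - ((pat.getD [[some "M", none, some "S"], [none, some "A", none], [some "M", none, some "S"]]).length : Int) + 1) 1).foldl (fun result i_row =>
        (PySem.List.pyRange 0 (PySem.Str.len (PySem.List.pyGetD ws 0 "") - ((PySem.List.pyGetD (pat.getD [[some "M", none, some "S"], [none, some "A", none], [some "M", none, some "S"]]) 0 []).length : Int) + 1) 1).foldl (fun result i_col =>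
          if ((PySem.List.enumerate (pat.getD [[some "M", none, some "S"], [none, some "A", none], [some "M", none, some "S"]]) 0).flatMap (fun rowe =>
              (PySem.List.enumerate rowe.2 0).filterMap (fun ce => ce.2.map (fun ch => (rowe.1, ce.1, ch))))).all (pvOkB ws i_row i_col)
          then result + 1 else result) result) (0 : Int) := by
    apply PySem.List.foldl_congr_mem
    intro acc i hi
    apply PySem.List.foldl_congr_mem
    intro acc2 j hj
    rw [PySem.List.mem_pyRange_one] at hi hj
    rw [hcw, PySem.Str.len_eq] at hj
    have hfetch : ∀ dr dc : Int, 0 ≤ dr →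
        dr < ((pat.getD [[some "M", none, some "S"], [none, some "A", none], [some "M", none, some "S"]]).length : Int) → 0 ≤ dc →
        dc < ((PySem.List.pyGetD (pat.getD [[some "M", none, some "S"], [none, some "A", none], [some "M", none, some "S"]]) 0 []).length : Int) →
        (PySem.List.pyGetD (PySem.List.pyGetD (pat.getD [[some "M", none, some "S"], [none, some "A", none], [some "M", none, some "S"]]) dr []) dc none).isSome = true →
        j + dc < ((PySem.List.pyGetD ws (i + dr) "").toList.length : Int) := by
      intro dr dc hdr0 hdrR hdc0 hdcC hsome
      have hdr' : dr = ((dr.toNat : Nat) : Int) := by omega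
      have hdc' : dc = ((dc.toNat : Nat) : Int) := by omega
      rw [hdr', hdc'] at hsome
      simp only [PySem.List.pyGetD_natCast] at hsome
      have hkey := hfetchN i.toNat (by omega) j.toNat (by omega) dr.toNat (by omega) dc.toNat (by omega) hsome
      have hidx : i + dr = ((i.toNat + dr.toNat : Nat) : Int) := by omega
      rw [hidx, PySem.List.pyGetD_natCast]
      omega
    rw [pv_found_eq ws _ hrect' i j hj.1 hfetch]
  rw [hstep1, pv_count]
  simp
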